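-- pv_equiv track=rewrite | github.com/Ign19ht/MyLibrary | backend/main.py | validate_image_name
-- ===== SOURCE A (Python) =====
-- def validate_image_name(image_name: str) -> bool:
--     if '.' not in image_name:
--         return False
--     name, extension = image_name.split(".", 1)
--     if any(not c.isalnum() for c in name + extension):
--         return False
--     if '..' in name:
--         return False
--     return True
-- ===== SOURCE B (Python) =====
-- def validate_image_name(image_name: str) -> bool:
--     # single pass with a dot counter instead of split + concat + any + substring test
--     dots = 0
--     for c in image_name:
--         if c == '.':
--             if dots == 0:
--                 dots = 1
--                 continue
--             return False
--         if not c.isalnum():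
--             return False
--     return dots >= 1
-- ===== Notes on version B (the rewrite author's own statement) =====
-- stated objective: simpler
-- what changed: Replaces A's maxsplit-on-dot plus string concatenation plus any() scan plus double-dot substring search with one stateful pass over the characters maintaining a dot counter with early exits.
import Mathlib
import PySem

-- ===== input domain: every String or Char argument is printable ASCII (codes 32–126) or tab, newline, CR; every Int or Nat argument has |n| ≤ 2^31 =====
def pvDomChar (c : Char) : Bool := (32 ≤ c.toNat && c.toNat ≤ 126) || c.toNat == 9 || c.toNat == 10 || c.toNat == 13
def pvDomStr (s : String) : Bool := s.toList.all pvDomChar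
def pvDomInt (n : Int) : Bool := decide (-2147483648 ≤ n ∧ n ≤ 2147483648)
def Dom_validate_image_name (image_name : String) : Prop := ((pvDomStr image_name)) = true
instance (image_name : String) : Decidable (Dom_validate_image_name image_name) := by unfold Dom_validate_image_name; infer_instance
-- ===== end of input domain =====

-- B replaces A's maxsplit + concat + any + substring test by one stateful character pass with a dot counter (same cost; simpler).

-- ===== PORT A =====
def validate_image_name (image_name : String) : Bool :=
  if (PySem.Chars.isIn ['.'] image_name.toList) = false then false
  else
    match PySem.Chars.splitOnMax image_name.toList ['.'] 1 with
    | [name, extension] =>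
        if (name ++ extension).any (fun c => ! PySem.Chars.isalnum c) then false
        else if PySem.Chars.isIn ['.', '.'] name then false
        else true
    | _ => false  -- unreachable: split(".", 1) with "." present yields exactly two parts

-- ===== PORT B =====
def pvScanB : List Char → Nat → Bool
  | [], dots => decide (1 ≤ dots)
  | c :: rest, dots =>
      if c = '.' then
        if dots = 0 then pvScanB rest 1 else false
      else if ! PySem.Chars.isalnum c then false
      else pvScanB rest dots

def validate_image_name_alt (image_name : String) : Bool :=
  pvScanB image_name.toList 0

-- ===== PRECONDITION & SPEC =====
def Spec_validate_image_name (image_name : String) (out : Bool) : Prop := out = validate_image_name_alt image_name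
instance (image_name : String) (out : Bool) : Decidable (Spec_validate_image_name image_name out) := by unfold Spec_validate_image_name; infer_instance

-- ===== CLAIM (what is proved, stated in full; the proofs are below) =====
def Claim_equal_validate_image_name : Prop := ∀ (image_name : String), Dom_validate_image_name image_name → Spec_validate_image_name image_name (validate_image_name image_name)

-- ===== LEMMAS AND PROOFS =====

theorem pv_isIn_singleton (c : Char) (l : List Char) :
    PySem.Chars.isIn [c] l = true ↔ c ∈ l := by
  rw [PySem.Chars.isIn_iff_infix]
  constructor
  · intro h
    exact h.sublist.subset (List.mem_singleton_self c)
  · intro h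
    obtain ⟨s, t, rfl⟩ := List.append_of_mem h
    exact ⟨s, t, by simp⟩

theorem pv_go_zero (fuel : Nat) (l cur : List Char) (acc : List (List Char)) :
    PySem.Chars.splitOnMax.go ['.'] fuel 0 l cur acc = ((cur.reverse ++ l) :: acc).reverse := by
  cases fuel with
  | zero => rfl
  | succ f => cases l with
    | nil => simp [PySem.Chars.splitOnMax.go]
    | cons c rest => simp [PySem.Chars.splitOnMax.go]

theorem pv_go_one (fuel : Nat) : ∀ (l cur : List Char), '.' ∈ l → l.length ≤ fuel →
    PySem.Chars.splitOnMax.go ['.'] fuel 1 l cur [] =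
      [cur.reverse ++ l.takeWhile (· ≠ '.'), (l.dropWhile (· ≠ '.')).tail] := by
  induction fuel with
  | zero =>
    intro l cur hmem hlen
    cases l with
    | nil => simp at hmem
    | cons c rest => simp at hlen
  | succ f ih =>
    intro l cur hmem hlen
    cases l with
    | nil => simp at hmem
    | cons c rest =>
      by_cases hc : c = '.'
      · subst hc
        simp only [PySem.Chars.splitOnMax.go, List.isPrefixOf, BEq.rfl, Bool.true_and,
          if_true, if_neg (by decide : ¬ (1 = 0))]
        rw [pv_go_zero]
        simp
      · have hmem' : '.' ∈ rest := by
          rcases List.mem_cons.mp hmem with h | h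
          · exact absurd h.symm hc
          · exact h
        have hpre : List.isPrefixOf ['.'] (c :: rest) = false := by
          simp [List.isPrefixOf]
          exact fun h => hc h.symm
        simp only [PySem.Chars.splitOnMax.go, hpre, if_neg (by decide : ¬ (1 = 0)),
          Bool.false_eq_true, if_false]
        rw [ih rest (c :: cur) hmem' (by simpa using Nat.le_of_succ_le_succ (by simpa using hlen))]
        simp [hc, List.append_assoc]

theorem pv_splitOnMax_dot (l : List Char) (hmem : '.' ∈ l) :
    PySem.Chars.splitOnMax l ['.'] 1 =
      [l.takeWhile (· ≠ '.'), (l.dropWhile (· ≠ '.')).tail] := by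
  unfold PySem.Chars.splitOnMax
  rw [if_neg (by decide : ¬ ((1 : Int) < 0))]
  exact pv_go_one (l.length + 1) l [] hmem (Nat.le_succ _)

theorem pv_scan_no_dot : ∀ (l : List Char), '.' ∉ l → pvScanB l 0 = false := by
  intro l
  induction l with
  | nil => intro _; rfl
  | cons c rest ih =>
    intro h
    have hc : ¬ c = '.' := fun hc => h (hc ▸ List.mem_cons_self)
    have hr : '.' ∉ rest := fun hr => h (List.mem_cons_of_mem _ hr)
    simp only [pvScanB, if_neg hc]
    by_cases ha : PySem.Chars.isalnum c
    · simp [ha, ih hr]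
    · simp [ha]

theorem pv_scan_prefix : ∀ (b : List Char) (rest : List Char) (d : Nat), '.' ∉ b →
    pvScanB (b ++ rest) d = (b.all PySem.Chars.isalnum && pvScanB rest d) := by
  intro b
  induction b with
  | nil => intro rest d _; simp
  | cons c b' ih =>
    intro rest d h
    have hc : ¬ c = '.' := fun hc => h (hc ▸ List.mem_cons_self)
    have hb : '.' ∉ b' := fun hb => h (List.mem_cons_of_mem _ hb)
    simp only [List.cons_append, pvScanB, if_neg hc]
    by_cases ha : PySem.Chars.isalnum c
    · simp [ha, ih rest d hb]
    · simp [ha]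

theorem pv_scan_one : ∀ (a : List Char),
    pvScanB a 1 = a.all (fun c => decide (c ≠ '.') && PySem.Chars.isalnum c) := by
  intro a
  induction a with
  | nil => rfl
  | cons c rest ih =>
    by_cases hc : c = '.'
    · subst hc; simp [pvScanB]
    · simp only [pvScanB, if_neg hc]
      by_cases ha : PySem.Chars.isalnum c
      · simp [ha, hc, ih]
      · simp [ha, hc]

theorem pv_alnum_ne_dot (c : Char) :
    (decide (c ≠ '.') && PySem.Chars.isalnum c) = PySem.Chars.isalnum c := by
  by_cases hc : c = '.'
  · subst hc; decide
  · simp [hc]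

theorem pv_all_alnum : ∀ (a : List Char),
    a.all (fun c => decide (c ≠ '.') && PySem.Chars.isalnum c) = a.all PySem.Chars.isalnum := by
  intro a
  induction a with
  | nil => rfl
  | cons c rest ih => simp only [List.all_cons, pv_alnum_ne_dot]

theorem pv_not_any_not (p : Char → Bool) : ∀ (l : List Char),
    (! l.any (fun c => ! p c)) = l.all p := by
  intro l
  induction l with
  | nil => rfl
  | cons c rest ih => by_cases h : p c <;> simp [h, ih]

-- ===== VERDICT (by name: the statement is the Claim_ definition above) =====
theorem validate_image_name_spec : Claim_equal_validate_image_name := by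
  intro s _
  unfold Spec_validate_image_name validate_image_name validate_image_name_alt
  by_cases hmem : '.' ∈ s.toList
  · have hin : PySem.Chars.isIn ['.'] s.toList = true := (pv_isIn_singleton _ _).mpr hmem
    rw [if_neg (by simp [hin])]
    rw [pv_splitOnMax_dot s.toList hmem]
    set before := s.toList.takeWhile (· ≠ '.') with hb
    set after := (s.toList.dropWhile (· ≠ '.')).tail with ha
    have hnd : '.' ∉ before := by
      intro h
      have := List.mem_takeWhile_imp h
      simp at this
    -- the dropWhile part starts with '.'
    have hdne : s.toList.dropWhile (· ≠ '.') ≠ [] := by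
      intro h
      have := List.dropWhile_eq_nil_iff.mp h '.' hmem
      simp at this
    have hhead : (s.toList.dropWhile (· ≠ '.')).head hdne = '.' := by
      have := List.head_dropWhile_not (p := (· ≠ '.')) hdne
      simpa using this
    obtain ⟨x, xs, hx⟩ := List.exists_cons_of_ne_nil hdne
    have hhead? : (s.toList.dropWhile (· ≠ '.')).head? = some '.' := by
      rw [List.head?_eq_some_head hdne, hhead]
    have hx1 : x = '.' := by
      rw [hx] at hhead?
      simpa using hhead?
    have hdrop : s.toList.dropWhile (· ≠ '.') = '.' :: after := by
      rw [ha, hx]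
      simp [hx1]
    have hdecomp : s.toList = before ++ '.' :: after := by
      rw [hb, ← hdrop, List.takeWhile_append_dropWhile]
    -- A's '..' substring test on the dot-free `before` is always false
    have hdd : PySem.Chars.isIn ['.', '.'] before = false := by
      rw [PySem.Chars.isIn_eq_false_iff]
      intro h
      exact hnd (h.sublist.subset List.mem_cons_self)
    -- reduce the A side
    have hA : (if (before ++ after).any (fun c => ! PySem.Chars.isalnum c) then false
        else if PySem.Chars.isIn ['.', '.'] before then false else true)
        = (before.all PySem.Chars.isalnum && after.all PySem.Chars.isalnum) := by
      rw [hdd]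
      by_cases hany : (before ++ after).any (fun c => ! PySem.Chars.isalnum c)
      · rw [if_pos hany]
        have := pv_not_any_not PySem.Chars.isalnum (before ++ after)
        rw [hany] at this
        simp only [List.all_append] at this
        simp [← this]
      · rw [if_neg hany]
        have := pv_not_any_not PySem.Chars.isalnum (before ++ after)
        rw [Bool.eq_false_iff.mpr hany] at this
        simp only [List.all_append] at this
        simp [← this]
    -- reduce the B side
    have hB : pvScanB s.toList 0
        = (before.all PySem.Chars.isalnum && after.all PySem.Chars.isalnum) := by
      rw [hdecomp, pv_scan_prefix before _ 0 hnd]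
      have h1 : pvScanB ('.' :: after) 0 = pvScanB after 1 := by simp [pvScanB]
      rw [h1, pv_scan_one]
      rw [pv_all_alnum]
    exact hA.trans hB.symm
  · have hin : PySem.Chars.isIn ['.'] s.toList = false :=
      Bool.eq_false_iff.mpr (fun h => hmem ((pv_isIn_singleton _ _).mp h))
    rw [if_pos hin, pv_scan_no_dot s.toList hmem]
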